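-- pv_equiv track=rewrite | github.com/varsharagi/python | tri.py | calculate_upper_lower_triangular_sum
-- ===== SOURCE A (Python) =====
-- def calculate_upper_lower_triangular_sum(matrix, N):
--     upper_sum = 0
--     lower_sum = 0
--
--     for i in range(N):
--         for j in range(N):
--             # Anti-diagonal index for element (i, j)
--             anti_diag_index = i + j
--
--             if j <= N - 1 - i:
--                 upper_sum += matrix[i][j]
--             if j >= N - 1 - i:
--                 lower_sum += matrix[i][j]
--
--     return upper_sum, lower_sum
-- ===== SOURCE B (Python) =====
-- def calculate_upper_lower_triangular_sum(matrix, N):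
--     rows = [row[:N] for row in matrix[:max(N, 0)]]
--     full_sum = sum(sum(row) for row in rows)
--     anti_sum = sum(row[N - 1 - i] for i, row in enumerate(rows))
--     upper_sum = sum(sum(row[:N - i]) for i, row in enumerate(rows))
--     return upper_sum, full_sum + anti_sum - upper_sum
-- ===== Notes on version B (the rewrite author's own statement) =====
-- stated objective: alternative
-- what changed: Replaces the double conditional test per cell with three unconditioned aggregates (full matrix sum, anti-diagonal sum, upper-triangle prefix sums over sliced rows) and derives the lower sum by inclusion-exclusion: lower = full + anti - upper.
import Mathlib
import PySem

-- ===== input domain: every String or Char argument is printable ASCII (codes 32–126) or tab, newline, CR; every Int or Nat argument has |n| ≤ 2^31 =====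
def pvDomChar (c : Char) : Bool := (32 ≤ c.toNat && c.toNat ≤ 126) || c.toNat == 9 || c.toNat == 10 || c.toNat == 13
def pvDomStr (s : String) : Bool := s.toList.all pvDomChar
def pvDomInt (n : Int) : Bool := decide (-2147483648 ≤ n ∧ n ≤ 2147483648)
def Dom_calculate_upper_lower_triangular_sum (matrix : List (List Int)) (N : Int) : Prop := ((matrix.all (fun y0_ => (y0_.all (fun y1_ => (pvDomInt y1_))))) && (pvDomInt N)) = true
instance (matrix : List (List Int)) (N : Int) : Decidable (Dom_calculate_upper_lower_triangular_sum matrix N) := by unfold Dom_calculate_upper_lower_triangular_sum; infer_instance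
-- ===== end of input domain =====

-- B computes three unconditioned aggregates (full sum, anti-diagonal sum, upper-triangle prefix sums)
-- and derives the lower triangular sum by inclusion-exclusion, instead of testing each cell twice.


-- ===== PORT A =====
def calculate_upper_lower_triangular_sum (matrix : List (List Int)) (N : Int) : Int × Int :=
  (PySem.List.pyRange 0 N 1).foldl (fun s i =>
    (PySem.List.pyRange 0 N 1).foldl (fun t j =>
      let t' := if j ≤ N - 1 - i then (t.1 + PySem.List.pyGetD (PySem.List.pyGetD matrix i []) j 0, t.2) else t
      if N - 1 - i ≤ j then (t'.1, t'.2 + PySem.List.pyGetD (PySem.List.pyGetD matrix i []) j 0) else t'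
    ) s) ((0 : Int), (0 : Int))

-- ===== PORT B =====
def calculate_upper_lower_triangular_sum_alt (matrix : List (List Int)) (N : Int) : Int × Int :=
  let rows := (PySem.List.slice matrix none (some (max N 0))).map (fun row => PySem.List.slice row none (some N))
  let full_sum := (rows.map (fun row => row.sum)).sum
  let anti_sum := ((PySem.List.enumerate rows 0).map (fun p => PySem.List.pyGetD p.2 (N - 1 - p.1) 0)).sum
  let upper_sum := ((PySem.List.enumerate rows 0).map (fun p => (PySem.List.slice p.2 none (some (N - p.1))).sum)).sum
  (upper_sum, full_sum + anti_sum - upper_sum)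

-- ===== PRECONDITION & SPEC =====
-- Pre_ excludes exactly the inputs on which A raises IndexError: fewer than N rows, or a row
-- among the first N with fewer than N entries.
def Pre_calculate_upper_lower_triangular_sum (matrix : List (List Int)) (N : Int) : Prop :=
  N ≤ (matrix.length : Int) ∧ ∀ row ∈ matrix.take N.toNat, N ≤ (row.length : Int)
instance (matrix : List (List Int)) (N : Int) : Decidable (Pre_calculate_upper_lower_triangular_sum matrix N) := by unfold Pre_calculate_upper_lower_triangular_sum; infer_instance
def pvWitness_calculate_upper_lower_triangular_sum : List (List Int) × Int := ([[1, 2], [3, 4]], 2)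
def Spec_calculate_upper_lower_triangular_sum (matrix : List (List Int)) (N : Int) (out : Int × Int) : Prop := out = calculate_upper_lower_triangular_sum_alt matrix N
instance (matrix : List (List Int)) (N : Int) (out : Int × Int) : Decidable (Spec_calculate_upper_lower_triangular_sum matrix N out) := by unfold Spec_calculate_upper_lower_triangular_sum; infer_instance

-- ===== CLAIM (what is proved, stated in full; the proofs are below) =====
def Claim_equal_calculate_upper_lower_triangular_sum : Prop := ∀ (matrix : List (List Int)) (N : Int), Dom_calculate_upper_lower_triangular_sum matrix N → Pre_calculate_upper_lower_triangular_sum matrix N → Spec_calculate_upper_lower_triangular_sum matrix N (calculate_upper_lower_triangular_sum matrix N)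

-- ===== LEMMAS AND PROOFS =====

-- sum of a map of getD over an initial range is the sum of the prefix
lemma sum_range_getD (t : List Int) (m : Nat) (hm : m ≤ t.length) :
    ((List.range m).map (fun j => t.getD j 0)).sum = (t.take m).sum := by
  induction m with
  | zero => simp
  | succ k ih =>
      rw [List.range_succ, List.take_add_one]
      simp only [List.map_append, List.sum_append, List.map_cons, List.map_nil]
      rw [ih (by omega)]
      have : t[k]? = some t[k] := List.getElem?_eq_getElem (by omega)
      simp [List.getD, this]

lemma take_succ_sum (t : List Int) (k : Nat) (h : k < t.length) :
    (t.take (k + 1)).sum = (t.take k).sum + t.getD k 0 := by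
  rw [← sum_range_getD t (k + 1) h, ← sum_range_getD t k (le_of_lt h), List.range_succ]
  simp

lemma sum_map_comb (R : List Int) (f g h : Int → Int) :
    (R.map (fun x => f x + g x - h x)).sum
      = (R.map f).sum + (R.map g).sum - (R.map h).sum := by
  induction R with
  | nil => simp
  | cons a t ih => simp [ih]; ring

lemma sum_ite_le_nat (t : List Int) (n k : Nat) (hk : k < n) (hn : n ≤ t.length) :
    ((List.range n).map (fun j => if j ≤ k then t.getD j 0 else 0)).sum = (t.take (k + 1)).sum := by
  induction n with
  | zero => omega
  | succ m ih =>
      rw [List.range_succ]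
      simp only [List.map_append, List.sum_append, List.map_cons, List.map_nil, List.sum_cons,
        List.sum_nil]
      rcases Nat.lt_or_ge k m with h | h
      · rw [ih h (by omega), if_neg (by omega)]; ring
      · have hkm : k = m := by omega
        subst hkm
        rw [if_pos (le_refl k)]
        have hc : (List.range k).map (fun j => if j ≤ k then t.getD j 0 else 0)
            = (List.range k).map (fun j => t.getD j 0) := by
          apply List.map_congr_left
          intro j hj
          exact if_pos (le_of_lt (List.mem_range.mp hj))
        rw [hc, sum_range_getD t k (by omega), take_succ_sum t k (by omega)]
        ring

lemma sum_ite_ge_nat (t : List Int) (n k : Nat) (hk : k < n) (hn : n ≤ t.length) :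
    ((List.range n).map (fun j => if k ≤ j then t.getD j 0 else 0)).sum
      = (t.take n).sum - (t.take k).sum := by
  induction n with
  | zero => omega
  | succ m ih =>
      rw [List.range_succ]
      simp only [List.map_append, List.sum_append, List.map_cons, List.map_nil, List.sum_cons,
        List.sum_nil]
      rw [if_pos (by omega : k ≤ m)]
      rcases Nat.lt_or_ge k m with h | h
      · rw [ih h (by omega), take_succ_sum t m (by omega)]; ring
      · have hkm : k = m := by omega
        subst hkm
        have hc : (List.range k).map (fun j => if k ≤ j then t.getD j 0 else 0)
            = (List.range k).map (fun _ => (0 : Int)) := by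
          apply List.map_congr_left
          intro j hj
          exact if_neg (by have := List.mem_range.mp hj; omega)
        rw [hc, take_succ_sum t k (by omega)]
        simp

-- pyRange 0 N 1 as a mapped Nat range
lemma pyRange_zero_eq (N : Int) :
    PySem.List.pyRange 0 N 1 = (List.range N.toNat).map (fun j : Nat => (j : Int)) := by
  rw [PySem.List.pyRange_one]
  simp only [sub_zero, zero_add]

-- the Int-indexed conditioned column sums of A, expressed as prefix sums
lemma sum_ite_le_int (t : List Int) (N i : Int) (h0 : 0 ≤ i) (hi : i < N)
    (hn : N.toNat ≤ t.length) :
    ((PySem.List.pyRange 0 N 1).map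
        (fun j => if j ≤ N - 1 - i then PySem.List.pyGetD t j 0 else 0)).sum
      = (t.take (N - i).toNat).sum := by
  have hk : N - 1 - i = ((N - 1 - i).toNat : Int) := by omega
  have h1 : (N - i).toNat = (N - 1 - i).toNat + 1 := by omega
  calc ((PySem.List.pyRange 0 N 1).map
        (fun j => if j ≤ N - 1 - i then PySem.List.pyGetD t j 0 else 0)).sum
      = ((List.range N.toNat).map
          (fun j : Nat => if j ≤ (N - 1 - i).toNat then t.getD j 0 else 0)).sum := by
        rw [pyRange_zero_eq, List.map_map]
        congr 1
        apply List.map_congr_left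
        intro j _
        simp only [Function.comp_apply, PySem.List.pyGetD_natCast]
        rw [hk]
        simp
    _ = (t.take ((N - 1 - i).toNat + 1)).sum :=
        sum_ite_le_nat t N.toNat (N - 1 - i).toNat (by omega) hn
    _ = (t.take (N - i).toNat).sum := by rw [h1]

lemma sum_ite_ge_int (t : List Int) (N i : Int) (h0 : 0 ≤ i) (hi : i < N)
    (hn : N.toNat ≤ t.length) :
    ((PySem.List.pyRange 0 N 1).map
        (fun j => if N - 1 - i ≤ j then PySem.List.pyGetD t j 0 else 0)).sum
      = (t.take N.toNat).sum - (t.take (N - 1 - i).toNat).sum := by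
  have hk : N - 1 - i = ((N - 1 - i).toNat : Int) := by omega
  calc ((PySem.List.pyRange 0 N 1).map
        (fun j => if N - 1 - i ≤ j then PySem.List.pyGetD t j 0 else 0)).sum
      = ((List.range N.toNat).map
          (fun j : Nat => if (N - 1 - i).toNat ≤ j then t.getD j 0 else 0)).sum := by
        rw [pyRange_zero_eq, List.map_map]
        congr 1
        apply List.map_congr_left
        intro j _
        simp only [Function.comp_apply, PySem.List.pyGetD_natCast]
        rw [hk]
        simp
    _ = (t.take N.toNat).sum - (t.take (N - 1 - i).toNat).sum :=
        sum_ite_ge_nat t N.toNat (N - 1 - i).toNat (by omega) hn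

-- A's nested conditional loop, split into two independent sums
lemma A_shape (matrix : List (List Int)) (N : Int) :
    calculate_upper_lower_triangular_sum matrix N =
      ( ((PySem.List.pyRange 0 N 1).map (fun i =>
          ((PySem.List.pyRange 0 N 1).map (fun j =>
            if j ≤ N - 1 - i then PySem.List.pyGetD (PySem.List.pyGetD matrix i []) j 0 else 0)).sum)).sum,
        ((PySem.List.pyRange 0 N 1).map (fun i =>
          ((PySem.List.pyRange 0 N 1).map (fun j =>
            if N - 1 - i ≤ j then PySem.List.pyGetD (PySem.List.pyGetD matrix i []) j 0 else 0)).sum)).sum ) := by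
  unfold calculate_upper_lower_triangular_sum
  have hstep : (fun (s : Int × Int) (i : Int) =>
      (PySem.List.pyRange 0 N 1).foldl (fun t j =>
        let t' := if j ≤ N - 1 - i then (t.1 + PySem.List.pyGetD (PySem.List.pyGetD matrix i []) j 0, t.2) else t
        if N - 1 - i ≤ j then (t'.1, t'.2 + PySem.List.pyGetD (PySem.List.pyGetD matrix i []) j 0) else t') s)
    = fun s i =>
      ((fun (a : Int) (i : Int) => a + ((PySem.List.pyRange 0 N 1).map (fun j =>
          if j ≤ N - 1 - i then PySem.List.pyGetD (PySem.List.pyGetD matrix i []) j 0 else 0)).sum) s.1 i,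
       (fun (b : Int) (i : Int) => b + ((PySem.List.pyRange 0 N 1).map (fun j =>
          if N - 1 - i ≤ j then PySem.List.pyGetD (PySem.List.pyGetD matrix i []) j 0 else 0)).sum) s.2 i) := by
    funext s i
    obtain ⟨a, b⟩ := s
    have hinner : (fun (t : Int × Int) (j : Int) =>
        let t' := if j ≤ N - 1 - i then (t.1 + PySem.List.pyGetD (PySem.List.pyGetD matrix i []) j 0, t.2) else t
        if N - 1 - i ≤ j then (t'.1, t'.2 + PySem.List.pyGetD (PySem.List.pyGetD matrix i []) j 0) else t')
      = fun t j =>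
        ((fun (a : Int) (j : Int) => a + (if j ≤ N - 1 - i then PySem.List.pyGetD (PySem.List.pyGetD matrix i []) j 0 else 0)) t.1 j,
         (fun (b : Int) (j : Int) => b + (if N - 1 - i ≤ j then PySem.List.pyGetD (PySem.List.pyGetD matrix i []) j 0 else 0)) t.2 j) := by
      funext t j
      dsimp only
      split_ifs <;> simp
    rw [hinner, PySem.List.foldl_prod_mk
      (f := fun (a : Int) (j : Int) => a + (if j ≤ N - 1 - i then PySem.List.pyGetD (PySem.List.pyGetD matrix i []) j 0 else 0))
      (g := fun (b : Int) (j : Int) => b + (if N - 1 - i ≤ j then PySem.List.pyGetD (PySem.List.pyGetD matrix i []) j 0 else 0)),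
      PySem.List.foldl_add, PySem.List.foldl_add]
  rw [hstep, PySem.List.foldl_prod_mk
    (f := fun (a : Int) (i : Int) => a + ((PySem.List.pyRange 0 N 1).map (fun j =>
        if j ≤ N - 1 - i then PySem.List.pyGetD (PySem.List.pyGetD matrix i []) j 0 else 0)).sum)
    (g := fun (b : Int) (i : Int) => b + ((PySem.List.pyRange 0 N 1).map (fun j =>
        if N - 1 - i ≤ j then PySem.List.pyGetD (PySem.List.pyGetD matrix i []) j 0 else 0)).sum),
    PySem.List.foldl_add, PySem.List.foldl_add]
  simp

-- an initial segment of a list as a range-indexed map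
lemma range_getD_eq_take {α : Type} (xs : List α) (d : α) (n : Nat) (h : n ≤ xs.length) :
    (List.range n).map (fun j => xs.getD j d) = xs.take n := by
  induction n with
  | zero => simp
  | succ k ih =>
      rw [List.range_succ, List.take_add_one]
      simp only [List.map_append, List.map_cons, List.map_nil]
      rw [ih (by omega)]
      have : xs[k]? = some xs[k] := List.getElem?_eq_getElem (by omega)
      simp [List.getD, this]

-- ===== VERDICT (by name: the statement is the Claim_ definition above) =====
theorem calculate_upper_lower_triangular_sum_spec : Claim_equal_calculate_upper_lower_triangular_sum := by
  intro matrix N _ hP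
  obtain ⟨h1, h2⟩ := hP
  unfold Spec_calculate_upper_lower_triangular_sum
  rw [A_shape]
  simp only [calculate_upper_lower_triangular_sum_alt]
  by_cases hN : N ≤ 0
  · have hr : PySem.List.pyRange 0 N 1 = [] := PySem.List.pyRange_one_eq_nil hN
    have hmax : max N 0 = 0 := by omega
    rw [hr, hmax, PySem.List.slice_to matrix (le_refl (0 : Int))]
    simp
  · push Not at hN
    have hmax : max N 0 = N := by omega
    have h1' : N.toNat ≤ matrix.length := by omega
    -- the list of (trimmed) rows B works on, as a map over the index range
    have hrows : (PySem.List.slice matrix none (some (max N 0))).map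
          (fun row => PySem.List.slice row none (some N))
        = (PySem.List.pyRange 0 N 1).map
            (fun i => (matrix.getD i.toNat []).take N.toNat) := by
      rw [hmax, PySem.List.slice_to matrix (le_of_lt hN)]
      have hf : (fun row : List Int => PySem.List.slice row none (some N))
          = fun row : List Int => row.take N.toNat := by
        funext row
        exact PySem.List.slice_to row (le_of_lt hN)
      rw [hf, ← range_getD_eq_take matrix [] N.toNat h1', pyRange_zero_eq]
      rw [List.map_map, List.map_map]
      apply List.map_congr_left
      intro j _
      simp
    rw [hrows]
    have hlenR : ((((PySem.List.pyRange 0 N 1).map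
        (fun i => (matrix.getD i.toNat []).take N.toNat))).length : Int) = N := by
      simp [PySem.List.length_pyRange_one]
      omega
    have henum : PySem.List.enumerate ((PySem.List.pyRange 0 N 1).map
          (fun i => (matrix.getD i.toNat []).take N.toNat))
        = (PySem.List.pyRange 0 N 1).map (fun j => (j, PySem.List.pyGetD
            ((PySem.List.pyRange 0 N 1).map
              (fun i => (matrix.getD i.toNat []).take N.toNat)) j [])) := by
      rw [PySem.List.enumerate_eq_map_pyRange (d := [])]
      rw [show PySem.List.len ((PySem.List.pyRange 0 N 1).map
          (fun i => (matrix.getD i.toNat []).take N.toNat)) = N from by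
        simp [PySem.List.length_pyRange_one]; omega]
    rw [henum]
    simp only [List.map_map]
    -- per-row facts
    have key : ∀ i : Int, 0 ≤ i → i < N →
        (PySem.List.pyGetD matrix i [] = matrix.getD i.toNat [] ∧
         N.toNat ≤ (matrix.getD i.toNat []).length) := by
      intro i hi0 hiN
      have hlt : i.toNat < matrix.length := by omega
      have hg : PySem.List.pyGetD matrix i [] = matrix.getD i.toNat [] := by
        rw [PySem.List.pyGetD_eq_getElem matrix [] hi0 (by omega), List.getD_eq_getElem _ _ hlt]
      have hlt2 : i.toNat < (matrix.take N.toNat).length := by simp; omega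
      have hmem : matrix.getD i.toNat [] ∈ matrix.take N.toNat := by
        have he : (matrix.take N.toNat)[i.toNat] = matrix.getD i.toNat [] := by
          rw [List.getElem_take, List.getD_eq_getElem _ _ hlt]
        exact he ▸ List.getElem_mem hlt2
      exact ⟨hg, by have := h2 _ hmem; omega⟩
    have hup : ∀ i : Int, 0 ≤ i → i < N →
        (PySem.List.slice ((matrix.getD i.toNat []).take N.toNat) none (some (N - i))).sum
          = ((matrix.getD i.toNat []).take (N - i).toNat).sum := by
      intro i hi0 hiN
      rw [PySem.List.slice_to _ (by omega : (0:Int) ≤ N - i), List.take_take]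
      congr 2
      omega
    refine Prod.ext ?_ ?_
    · -- upper component
      dsimp only
      congr 1
      apply List.map_congr_left
      intro i hi
      obtain ⟨hi0, hiN⟩ := (PySem.List.mem_pyRange_one).mp hi
      obtain ⟨hg, hlen2⟩ := key i hi0 hiN
      simp only [Function.comp_apply]
      rw [PySem.List.pyGetD_map_pyRange_of_nonneg _ N i [] hi0 hiN, hg, hup i hi0 hiN]
      exact sum_ite_le_int _ N i hi0 hiN hlen2
    · -- lower component via inclusion-exclusion
      dsimp only
      calc ((PySem.List.pyRange 0 N 1).map (fun i =>
              ((PySem.List.pyRange 0 N 1).map (fun j =>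
                if N - 1 - i ≤ j then PySem.List.pyGetD (PySem.List.pyGetD matrix i []) j 0 else 0)).sum)).sum
          = ((PySem.List.pyRange 0 N 1).map (fun i =>
              ((matrix.getD i.toNat []).take N.toNat).sum
                + PySem.List.pyGetD ((matrix.getD i.toNat []).take N.toNat) (N - 1 - i) 0
                - ((matrix.getD i.toNat []).take (N - i).toNat).sum)).sum := by
            congr 1
            apply List.map_congr_left
            intro i hi
            obtain ⟨hi0, hiN⟩ := (PySem.List.mem_pyRange_one).mp hi
            obtain ⟨hg, hlen2⟩ := key i hi0 hiN
            rw [hg, sum_ite_ge_int _ N i hi0 hiN hlen2]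
            have hanti : PySem.List.pyGetD ((matrix.getD i.toNat []).take N.toNat) (N - 1 - i) 0
                = (matrix.getD i.toNat []).getD (N - 1 - i).toNat 0 := by
              rw [PySem.List.pyGetD_eq_getElem _ 0 (by omega) (by rw [List.length_take]; omega)]
              rw [List.getElem_take]
              exact (List.getD_eq_getElem _ _ (by omega)).symm
            rw [hanti, show (N - i).toNat = (N - 1 - i).toNat + 1 from by omega,
              take_succ_sum _ _ (by omega)]
            ring
        _ = ((PySem.List.pyRange 0 N 1).map (fun i =>
                ((matrix.getD i.toNat []).take N.toNat).sum)).sum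
              + ((PySem.List.pyRange 0 N 1).map (fun i =>
                PySem.List.pyGetD ((matrix.getD i.toNat []).take N.toNat) (N - 1 - i) 0)).sum
              - ((PySem.List.pyRange 0 N 1).map (fun i =>
                ((matrix.getD i.toNat []).take (N - i).toNat).sum)).sum :=
            sum_map_comb _ _ _ _
        _ = _ := by
            have eanti : (PySem.List.pyRange 0 N 1).map
                ((fun p : Int × List Int => PySem.List.pyGetD p.2 (N - 1 - p.1) 0) ∘ fun j =>
                  (j, PySem.List.pyGetD ((PySem.List.pyRange 0 N 1).map
                    (fun i => (matrix.getD i.toNat []).take N.toNat)) j []))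
              = (PySem.List.pyRange 0 N 1).map
                  (fun i => PySem.List.pyGetD ((matrix.getD i.toNat []).take N.toNat) (N - 1 - i) 0) := by
              apply List.map_congr_left
              intro i hi
              obtain ⟨hi0, hiN⟩ := (PySem.List.mem_pyRange_one).mp hi
              simp only [Function.comp_apply]
              rw [PySem.List.pyGetD_map_pyRange_of_nonneg _ N i [] hi0 hiN]
            have eup : (PySem.List.pyRange 0 N 1).map
                ((fun p : Int × List Int => (PySem.List.slice p.2 none (some (N - p.1))).sum) ∘ fun j =>
                  (j, PySem.List.pyGetD ((PySem.List.pyRange 0 N 1).map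
                    (fun i => (matrix.getD i.toNat []).take N.toNat)) j []))
              = (PySem.List.pyRange 0 N 1).map
                  (fun i => ((matrix.getD i.toNat []).take (N - i).toNat).sum) := by
              apply List.map_congr_left
              intro i hi
              obtain ⟨hi0, hiN⟩ := (PySem.List.mem_pyRange_one).mp hi
              simp only [Function.comp_apply]
              rw [PySem.List.pyGetD_map_pyRange_of_nonneg _ N i [] hi0 hiN, hup i hi0 hiN]
            rw [eanti, eup]
            rfl
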